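-- pv_equiv track=rewrite | github.com/sweenzor/roam-mcp | src/mcp_server_roam/server.py | detect_indent_unit
-- ===== SOURCE A (Python) =====
-- DEFAULT_TAB_WIDTH = 2
--
-- def detect_indent_unit(lines: list[str]) -> int:
--     """Detect the indentation unit (spaces per level).
--
--     Strategy:
--     1. Find all indentation levels used
--     2. Calculate GCD of all indent amounts
--     3. Default to 2 if can't determine
--
--     Args:
--         lines: List of lines to analyze.
--
--     Returns:
--         The detected indent unit (number of spaces per level).
--     """
--     from functools import reduce
--     from math import gcd
--
--     indents: set[int] = set()
--     for line in lines:
--         if line.strip():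
--             # Expand tabs to spaces for counting
--             expanded = line.expandtabs(DEFAULT_TAB_WIDTH)
--             stripped = expanded.lstrip()
--             indent = len(expanded) - len(stripped)
--             if indent > 0:
--                 indents.add(indent)
--
--     if not indents:
--         return DEFAULT_TAB_WIDTH
--
--     # Find GCD of all indents
--     return reduce(gcd, indents) or DEFAULT_TAB_WIDTH
-- ===== SOURCE B (Python) =====
-- DEFAULT_TAB_WIDTH = 2
--
-- def detect_indent_unit(lines):
--     """Detect the indentation unit via a single running-GCD pass."""
--     from math import gcd
--     current = 0
--     for line in lines:
--         if line.strip():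
--             expanded = line.expandtabs(DEFAULT_TAB_WIDTH)
--             indent = len(expanded) - len(expanded.lstrip())
--             if indent > 0:
--                 current = gcd(current, indent)
--     return current or DEFAULT_TAB_WIDTH
-- ===== Notes on version B (the rewrite author's own statement) =====
-- stated objective: simpler
-- what changed: Replaces the build-a-set-of-indents-then-reduce(gcd) two-stage structure with a single fused pass keeping one running gcd accumulator (gcd(0,x)=x), so no intermediate set is materialized.
import Mathlib
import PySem

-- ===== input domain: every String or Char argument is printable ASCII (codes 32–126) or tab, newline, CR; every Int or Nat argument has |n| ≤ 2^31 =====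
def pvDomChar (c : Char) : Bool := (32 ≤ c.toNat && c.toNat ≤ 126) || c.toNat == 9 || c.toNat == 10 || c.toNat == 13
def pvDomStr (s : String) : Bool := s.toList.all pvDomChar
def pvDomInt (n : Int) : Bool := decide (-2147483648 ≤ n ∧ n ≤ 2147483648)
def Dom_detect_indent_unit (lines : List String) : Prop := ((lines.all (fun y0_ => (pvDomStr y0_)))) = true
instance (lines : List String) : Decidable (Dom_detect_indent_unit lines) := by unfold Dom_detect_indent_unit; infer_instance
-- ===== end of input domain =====

-- B replaces A's build-a-set-then-reduce(gcd) two-stage structure by a single fused pass with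
-- one running gcd accumulator (no intermediate set); objective: simpler.

-- hand port of str.expandtabs(ts) (PySem has no expandtabs): a tab advances the column to the
-- next multiple of ts emitting that many spaces; '\n'/'\r' reset the column; exact for ts > 0.
def pvExpandTabs (ts : Nat) : List Char → Nat → List Char
  | [], _ => []
  | c :: rest, col =>
    if c = '\t' then
      let n := ts - col % ts
      List.replicate n ' ' ++ pvExpandTabs ts rest (col + n)
    else if c = '\n' ∨ c = '\r' then c :: pvExpandTabs ts rest 0
    else c :: pvExpandTabs ts rest (col + 1)

-- ===== PORT A =====
-- loop body of A: non-blank line → expand tabs, measure indent, add positive indents to the set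
def pvStepA (indents : PySem.Set Int) (line : String) : PySem.Set Int :=
  if PySem.Str.strip line ≠ "" then
    let expanded := String.mk (pvExpandTabs 2 line.toList 0)
    let stripped := PySem.Str.lstrip expanded
    let indent := PySem.Str.len expanded - PySem.Str.len stripped
    if indent > 0 then PySem.Set.add indents indent else indents
  else indents

def detect_indent_unit (lines : List String) : Int :=
  let indents := lines.foldl pvStepA PySem.Set.empty
  match indents with
  | [] => 2
  | h :: t =>
    -- reduce(gcd, indents): gcd is associative/commutative, so folding the set's list is exact
    let r := t.foldl (fun a b => (Int.gcd a b : Int)) h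
    if r = 0 then 2 else r

-- ===== PORT B =====
-- loop body of B: non-blank line → expand tabs, measure indent, fold positive indents into the running gcd
def pvStepB (current : Int) (line : String) : Int :=
  if PySem.Str.strip line ≠ "" then
    let expanded := String.mk (pvExpandTabs 2 line.toList 0)
    let indent := PySem.Str.len expanded - PySem.Str.len (PySem.Str.lstrip expanded)
    if indent > 0 then (Int.gcd current indent : Int) else current
  else current

def detect_indent_unit_alt (lines : List String) : Int :=
  let current := lines.foldl pvStepB 0
  if current = 0 then 2 else current

-- ===== PRECONDITION & SPEC =====
def Spec_detect_indent_unit (lines : List String) (out : Int) : Prop := out = detect_indent_unit_alt lines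
instance (lines : List String) (out : Int) : Decidable (Spec_detect_indent_unit lines out) := by unfold Spec_detect_indent_unit; infer_instance

-- ===== CLAIM (what is proved, stated in full; the proofs are below) =====
def Claim_equal_detect_indent_unit : Prop := ∀ (lines : List String), Dom_detect_indent_unit lines → Spec_detect_indent_unit lines (detect_indent_unit lines)

-- ===== LEMMAS AND PROOFS =====

-- the gcd fold over a list of ints, starting at a
def pvG (a : Int) (l : List Int) : Int := l.foldl (fun a b => (Int.gcd a b : Int)) a

theorem pvG_cons (a b : Int) (t : List Int) : pvG a (b :: t) = pvG ((Int.gcd a b : Nat) : Int) t := by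
  simp only [pvG, List.foldl_cons]

theorem pvG_dvd_init (l : List Int) : ∀ a : Int, pvG a l ∣ a := by
  induction l with
  | nil => intro a; exact dvd_refl a
  | cons b t ih =>
      intro a
      rw [pvG_cons]
      exact dvd_trans (ih _) (Int.gcd_dvd_left a b)

theorem pvG_dvd_mem (l : List Int) : ∀ (a x : Int), x ∈ l → pvG a l ∣ x := by
  induction l with
  | nil => intro a x hx; cases hx
  | cons b t ih =>
      intro a x hx
      rw [pvG_cons]
      cases hx with
      | head => exact dvd_trans (pvG_dvd_init t _) (Int.gcd_dvd_right a b)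
      | tail _ hx => exact ih _ _ hx

theorem pvG_nonneg (l : List Int) : ∀ a : Int, 0 ≤ a → 0 ≤ pvG a l := by
  induction l with
  | nil => intro a ha; exact ha
  | cons b t ih =>
      intro a _
      rw [pvG_cons]
      exact ih _ (Int.natCast_nonneg _)

theorem pvSet_add_mem {s : List Int} {i : Int} (h : i ∈ s) : PySem.Set.add s i = s := by
  simp [PySem.Set.add, PySem.Set.contains, h]

theorem pvSet_add_not_mem {s : List Int} {i : Int} (h : i ∉ s) : PySem.Set.add s i = s ++ [i] := by
  simp [PySem.Set.add, PySem.Set.contains, h]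

theorem pvG_add (s : List Int) (i : Int) :
    pvG 0 (PySem.Set.add s i) = (Int.gcd (pvG 0 s) i : Int) := by
  by_cases hmem : i ∈ s
  · rw [pvSet_add_mem hmem]
    have hdvd : pvG 0 s ∣ i := pvG_dvd_mem s 0 i hmem
    have hnn : 0 ≤ pvG 0 s := pvG_nonneg s 0 le_rfl
    rw [Int.gcd_eq_left hnn hdvd]
  · rw [pvSet_add_not_mem hmem]
    simp [pvG, List.foldl_append]

theorem pvG_cons_pos (h : Int) (t : List Int) (hpos : 0 < h) :
    pvG 0 (h :: t) = pvG h t := by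
  rw [pvG_cons]
  congr 1
  rw [Int.gcd_zero_left, Int.natAbs_of_nonneg (le_of_lt hpos)]

-- one loop step keeps the invariant: positivity of the set, and stepB = gcd-fold of stepA's set
theorem pvStep_pos (s : PySem.Set Int) (line : String) (hpos : ∀ x ∈ s, 0 < x) :
    ∀ x ∈ pvStepA s line, 0 < x := by
  intro x hx
  simp only [pvStepA] at hx
  split_ifs at hx with h1 h2
  · by_cases hmem : PySem.Str.len (String.mk (pvExpandTabs 2 line.toList 0)) -
        PySem.Str.len (PySem.Str.lstrip (String.mk (pvExpandTabs 2 line.toList 0))) ∈ s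
    · rw [pvSet_add_mem hmem] at hx
      exact hpos x hx
    · rw [pvSet_add_not_mem hmem] at hx
      rcases List.mem_append.mp hx with hx' | hx'
      · exact hpos x hx'
      · have hx2 := List.mem_singleton.mp hx'
        rw [hx2]
        exact h2
  · exact hpos x hx
  · exact hpos x hx

theorem pvStep_gcd (s : PySem.Set Int) (g : Int) (line : String) (hg : g = pvG 0 s) :
    pvStepB g line = pvG 0 (pvStepA s line) := by
  simp only [pvStepA, pvStepB]
  split_ifs with h1 h2
  · rw [hg, pvG_add]
  · exact hg
  · exact hg

-- invariant over the whole loop: B's accumulator is the gcd-fold of A's set, which stays positive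
theorem pv_main (lines : List String) : ∀ (s : PySem.Set Int) (g : Int),
    (∀ x ∈ s, 0 < x) → g = pvG 0 s →
    (∀ x ∈ lines.foldl pvStepA s, 0 < x) ∧
      lines.foldl pvStepB g = pvG 0 (lines.foldl pvStepA s) := by
  induction lines with
  | nil => intro s g hpos hg; exact ⟨hpos, hg⟩
  | cons line rest ih =>
      intro s g hpos hg
      simp only [List.foldl_cons]
      exact ih _ _ (pvStep_pos s line hpos) (pvStep_gcd s g line hg)

-- the post-processing of both programs agrees once B's accumulator equals the set's gcd-fold
theorem pv_final (lines : List String) (S : List Int) (g : Int)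
    (hS : lines.foldl pvStepA PySem.Set.empty = S)
    (hpos : ∀ x ∈ S, 0 < x) (hg : g = pvG 0 S) :
    detect_indent_unit lines = if g = 0 then 2 else g := by
  unfold detect_indent_unit
  rw [hS]
  cases S with
  | nil =>
      subst hg
      simp [pvG]
  | cons h t =>
      have hhpos : 0 < h := hpos h List.mem_cons_self
      have hgr : g = pvG h t := by rw [hg, pvG_cons_pos h t hhpos]
      have hrne : g ≠ 0 := by
        have hrdvd : pvG h t ∣ h := pvG_dvd_init t h
        rw [hgr]
        intro h0
        rw [h0] at hrdvd
        exact absurd (zero_dvd_iff.mp hrdvd) (by omega)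
      have hgr' : t.foldl (fun a b => (Int.gcd a b : Int)) h = g := hgr.symm
      simp only [hgr', if_neg hrne]

-- ===== VERDICT (by name: the statement is the Claim_ definition above) =====
theorem detect_indent_unit_spec : Claim_equal_detect_indent_unit := by
  intro lines _
  unfold Spec_detect_indent_unit
  obtain ⟨hpos, hg⟩ := pv_main lines PySem.Set.empty 0 (by simp [PySem.Set.empty]) (by simp [pvG, PySem.Set.empty])
  exact pv_final lines _ _ rfl hpos hg
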